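-- pv_equiv track=rewrite | github.com/Vishavjeet6/python-programmes | fibinarry(kth number).py | fibinarry
-- ===== SOURCE A (Python) =====
-- def fibinarry(n):
--     pl = 0
--     while n:
--         if n&1 and pl:
--             return False
--         pl = n&1
--         n>>=1
--     return True
-- ===== SOURCE B (Python) =====
-- def fibinarry(n):
--     return n & (n >> 1) == 0
-- ===== Notes on version B (the rewrite author's own statement) =====
-- stated objective: idiomatic
-- what changed: Replaces the bit-by-bit loop that tracks the previous bit with the closed-form bitmask test n & (n >> 1) == 0, which checks all adjacent-bit pairs at once.
import Mathlib
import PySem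

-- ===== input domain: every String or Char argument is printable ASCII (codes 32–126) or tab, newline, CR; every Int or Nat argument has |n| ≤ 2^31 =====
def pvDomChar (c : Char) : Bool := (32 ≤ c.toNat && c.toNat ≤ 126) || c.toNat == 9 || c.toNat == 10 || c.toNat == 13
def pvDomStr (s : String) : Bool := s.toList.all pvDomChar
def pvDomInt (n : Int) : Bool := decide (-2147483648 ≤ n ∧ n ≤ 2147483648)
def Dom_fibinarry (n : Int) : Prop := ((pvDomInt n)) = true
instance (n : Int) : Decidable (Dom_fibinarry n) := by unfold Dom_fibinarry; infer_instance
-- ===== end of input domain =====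

-- B replaces A's bit-by-bit loop (previous-bit state `pl`) with the single bitmask test
-- n & (n >> 1) == 0 — more idiomatic, same result on every int (negatives included).


-- ===== PORT A =====
-- A's while-loop, step for step: `while n` / `if n&1 and pl: return False` / `pl = n&1` /
-- `n >>= 1` (Python's & and >> on ints = PySem.Int.band and Lean's >>>; on a negative n
-- the arithmetic shift stabilises at -1 and the loop then returns False, so it terminates).
def fibinarryLoop (n : Int) (pl : Int) : Bool :=
  if _hn : n = 0 then true                                   -- while-condition `n` false → return True
  else if PySem.Int.band n 1 ≠ 0 ∧ pl ≠ 0 then false         -- if n&1 and pl: return False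
  else fibinarryLoop (n >>> (1 : Nat)) (PySem.Int.band n 1)  -- pl = n&1; n >>= 1
termination_by 2 * n.natAbs + (if pl = 0 then 1 else 0)
decreasing_by
  rename_i h
  rcases n with m | m
  · have hm : m ≠ 0 := by simpa using _hn
    show 2 * (Int.ofNat (m >>> 1)).natAbs + _ < 2 * (Int.ofNat m).natAbs + _
    simp only [Int.natAbs, Nat.shiftRight_one]
    have := Nat.div_lt_self (Nat.pos_of_ne_zero hm) (by norm_num : (1:Nat) < 2)
    split_ifs <;> omega
  · show 2 * (Int.negSucc (m >>> 1)).natAbs + _ < 2 * (Int.negSucc m).natAbs + _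
    simp only [Int.natAbs, Nat.shiftRight_one]
    rcases Nat.eq_zero_or_pos m with rfl | hm
    · have hb : PySem.Int.band (Int.negSucc 0) 1 = 1 := by decide
      have hpl : pl = 0 := by
        by_contra hp
        exact h ⟨by rw [hb]; norm_num, hp⟩
      rw [hb, hpl]
      norm_num
    · have := Nat.div_lt_self hm (by norm_num : (1:Nat) < 2)
      split_ifs <;> omega

def fibinarry (n : Int) : Bool := fibinarryLoop n 0

-- ===== PORT B =====
-- Source B: return n & (n >> 1) == 0   (PySem.Int.band = Python's &, >>> = Python's >>)
def fibinarry_alt (n : Int) : Bool := decide (PySem.Int.band n (n >>> (1 : Nat)) = 0)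

-- ===== PRECONDITION & SPEC =====
def Spec_fibinarry (n : Int) (out : Bool) : Prop := out = fibinarry_alt n
instance (n : Int) (out : Bool) : Decidable (Spec_fibinarry n out) := by unfold Spec_fibinarry; infer_instance

-- ===== CLAIM (what is proved, stated in full; the proofs are below) =====
def Claim_equal_fibinarry : Prop := ∀ (n : Int), Dom_fibinarry n → Spec_fibinarry n (fibinarry n)

-- ===== LEMMAS AND PROOFS =====

-- bit-level decomposition of & on Nat: x & y = 0 iff the low bits do not collide and
-- the shifted halves do not collide.
lemma land_zero_iff (x y : Nat) :
    (x &&& y = 0) ↔ ((x &&& 1 = 0 ∨ y &&& 1 = 0) ∧ ((x >>> 1) &&& (y >>> 1) = 0)) := by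
  conv_lhs => rw [← Nat.bit_testBit_zero_shiftRight_one x, ← Nat.bit_testBit_zero_shiftRight_one y]
  rw [Nat.land_bit, Nat.bit_eq_zero_iff]
  simp only [Nat.testBit_zero, Bool.and_eq_false_iff, decide_eq_false_iff_not,
    Nat.mod_two_ne_one, Nat.and_one_is_mod]
  omega

-- Python's & of two negative ints is negative (infinite two's complement), hence never 0.
lemma band_negSucc_ne_zero (m k : Nat) :
    PySem.Int.band (Int.negSucc m) (Int.negSucc k) ≠ 0 := by
  have h1 : ¬ (0 : Int) ≤ Int.negSucc m := by omega
  have h2 : ¬ (0 : Int) ≤ Int.negSucc k := by omega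
  simp only [PySem.Int.band, h1, h2, if_false]
  have : (0:Int) ≤ ((-Int.negSucc m - 1).toNat ||| (-Int.negSucc k - 1).toNat : Nat) := by positivity
  omega

-- the same decomposition at the Int level (for negative n both sides are false).
lemma band_shift_step (n : Int) :
    (PySem.Int.band n (n >>> (1 : Nat)) = 0) ↔
      ((PySem.Int.band n 1 = 0 ∨ PySem.Int.band (n >>> (1 : Nat)) 1 = 0) ∧
        PySem.Int.band (n >>> (1 : Nat)) ((n >>> (1 : Nat)) >>> (1 : Nat)) = 0) := by
  rcases n with m | m
  · show (PySem.Int.band (m : Int) ((m >>> 1 : Nat) : Int) = 0) ↔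
      ((PySem.Int.band (m : Int) ((1 : Nat) : Int) = 0 ∨
          PySem.Int.band ((m >>> 1 : Nat) : Int) ((1 : Nat) : Int) = 0) ∧
        PySem.Int.band ((m >>> 1 : Nat) : Int) ((m >>> 1 >>> 1 : Nat) : Int) = 0)
    simp only [PySem.Int.band_natCast]
    norm_cast
    exact land_zero_iff m (m >>> 1)
  · show (PySem.Int.band (Int.negSucc m) (Int.negSucc (m >>> 1)) = 0) ↔
      ((PySem.Int.band (Int.negSucc m) 1 = 0 ∨ PySem.Int.band (Int.negSucc (m >>> 1)) 1 = 0) ∧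
        PySem.Int.band (Int.negSucc (m >>> 1)) (Int.negSucc (m >>> 1 >>> 1)) = 0)
    have ha := band_negSucc_ne_zero m (m >>> 1)
    have hb := band_negSucc_ne_zero (m >>> 1) (m >>> 1 >>> 1)
    tauto

-- loop invariant: the loop computes the mask test, guarded by the incoming pl bit.
lemma fibinarryLoop_eq (n : Int) (pl : Int) :
    fibinarryLoop n pl =
      (decide (PySem.Int.band n (n >>> (1 : Nat)) = 0) &&
        (pl == 0 || PySem.Int.band n 1 == 0)) := by
  induction n, pl using fibinarryLoop.induct with
  | case1 pl =>
    rw [fibinarryLoop]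
    simp [show PySem.Int.band 0 1 = 0 from by decide]
  | case2 n pl hn hc =>
    rw [fibinarryLoop, dif_neg hn, if_pos hc]
    have h2 : (pl == 0 || PySem.Int.band n 1 == 0) = false := by
      rw [beq_eq_false_iff_ne.mpr hc.2, beq_eq_false_iff_ne.mpr hc.1]
      rfl
    rw [h2, Bool.and_false]
  | case3 n pl hn hc ih =>
    rw [fibinarryLoop, dif_neg hn, if_neg hc, ih]
    rw [Bool.eq_iff_iff]
    simp only [Bool.and_eq_true, Bool.or_eq_true, decide_eq_true_eq, beq_iff_eq]
    rw [band_shift_step n]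
    rw [Decidable.not_and_iff_or_not] at hc
    tauto

-- ===== VERDICT (by name: the statement is the Claim_ definition above) =====
theorem fibinarry_spec : Claim_equal_fibinarry := by
  intro n _
  unfold Spec_fibinarry fibinarry fibinarry_alt
  rw [fibinarryLoop_eq]
  simp
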